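-- pv_equiv track=rewrite | github.com/joshanashakya/dissertation | workspace/dataset/java-python/GeeksForGeeks/1398/A/2.py | getHermiteNumber
-- ===== SOURCE A (Python) =====
-- def getHermiteNumber( n):
--
--     # Base conditions
--     if n == 0 :
--         return 1
--     if n == 1 :
--         return 0
--
--     else :
--         return (-2 * (n - 1) *
--                 getHermiteNumber(n - 2))
-- ===== SOURCE B (Python) =====
-- def getHermiteNumber(n):
--     if n == 0:
--         return 1
--     if n == 1:
--         return 0
--     result = 1
--     while n > 1:
--         result *= -2 * (n - 1)
--         n -= 2
--     return 0 if n == 1 else result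
-- ===== Notes on version B (the rewrite author's own statement) =====
-- stated objective: alternative
-- what changed: Replaces the recursive telescoping product with a flat iterative while-loop accumulating the same product, avoiding a call stack.
import Mathlib
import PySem

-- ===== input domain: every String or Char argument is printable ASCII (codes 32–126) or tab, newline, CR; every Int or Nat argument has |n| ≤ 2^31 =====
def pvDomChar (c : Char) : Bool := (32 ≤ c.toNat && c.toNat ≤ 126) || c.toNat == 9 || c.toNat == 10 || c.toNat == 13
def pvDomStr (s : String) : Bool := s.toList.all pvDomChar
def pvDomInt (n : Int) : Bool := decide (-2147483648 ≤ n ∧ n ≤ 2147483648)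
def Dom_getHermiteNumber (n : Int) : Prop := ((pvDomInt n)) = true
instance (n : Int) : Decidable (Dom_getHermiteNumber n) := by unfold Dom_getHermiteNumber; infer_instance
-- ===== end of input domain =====

-- B replaces A's recursive telescoping product with a flat iterative loop (same values for n ≥ 0; no call stack).


-- ===== PORT A =====
-- Recursive, as in A; the `n < 0` branch is a totality guard only: Python raises
-- RecursionError there and those inputs are excluded by Pre_.
def getHermiteNumber (n : Int) : Int :=
  if n = 0 then 1
  else if n = 1 then 0
  else if n < 0 then 0
  else -2 * (n - 1) * getHermiteNumber (n - 2)
termination_by n.toNat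
decreasing_by
  have h2 : 2 ≤ n := by omega
  omega

-- ===== PORT B =====
-- the `while n > 1` loop of Source B, state (n, result)
def hermLoop (n : Int) (result : Int) : Int :=
  if n > 1 then hermLoop (n - 2) (result * (-2 * (n - 1)))
  else if n = 1 then 0 else result
termination_by n.toNat
decreasing_by omega

def getHermiteNumber_alt (n : Int) : Int :=
  if n = 0 then 1
  else if n = 1 then 0
  else hermLoop n 1

-- ===== PRECONDITION & SPEC =====
-- Pre_ excludes n < 0, where Python A raises RecursionError (infinite recursion).
def Pre_getHermiteNumber (n : Int) : Prop := 0 ≤ n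
instance (n : Int) : Decidable (Pre_getHermiteNumber n) := by unfold Pre_getHermiteNumber; infer_instance
def pvWitness_getHermiteNumber : Int := 6

def Spec_getHermiteNumber (n : Int) (out : Int) : Prop := out = getHermiteNumber_alt n
instance (n : Int) (out : Int) : Decidable (Spec_getHermiteNumber n out) := by unfold Spec_getHermiteNumber; infer_instance

-- ===== CLAIM (what is proved, stated in full; the proofs are below) =====
def Claim_equal_getHermiteNumber : Prop := ∀ (n : Int), Dom_getHermiteNumber n → Pre_getHermiteNumber n → Spec_getHermiteNumber n (getHermiteNumber n)

-- ===== LEMMAS AND PROOFS =====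

-- loop invariant: for n ≥ 0 the loop computes result * H(n)
theorem hermLoop_eq (k : Nat) : ∀ (n : Int), n.toNat = k → 0 ≤ n →
    ∀ r, hermLoop n r = r * getHermiteNumber n := by
  induction k using Nat.strong_induction_on with
  | _ k ih =>
    intro n hk hn r
    rw [hermLoop, getHermiteNumber]
    by_cases h1 : n > 1
    · have hne0 : ¬ n = 0 := by omega
      have hne1 : ¬ n = 1 := by omega
      have hneg : ¬ n < 0 := by omega
      simp only [if_pos h1, if_neg hne0, if_neg hne1, if_neg hneg]
      rw [ih (n - 2).toNat (by omega) (n - 2) rfl (by omega)]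
      ring
    · simp only [if_neg h1]
      by_cases h0 : n = 0
      · simp [h0]
      · have hn1 : n = 1 := by omega
        simp [hn1]

-- ===== VERDICT (by name: the statement is the Claim_ definition above) =====
theorem getHermiteNumber_spec : Claim_equal_getHermiteNumber := by
  intro n _ hpre
  unfold Spec_getHermiteNumber getHermiteNumber_alt
  by_cases h0 : n = 0
  · simp [h0, getHermiteNumber]
  · by_cases h1 : n = 1
    · simp [h1, getHermiteNumber]
    · rw [if_neg h0, if_neg h1, hermLoop_eq n.toNat n rfl hpre 1, one_mul]
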